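-- pv_equiv track=rewrite | github.com/AleksiSaxlund/TiraLabra | src/tekoaly/heurestiikka_temp.py | heurestiikka
-- ===== SOURCE A (Python) =====
-- def heurestiikka(lauta, maksivoitava, minivoitava):
--     # Checking for Rows for X or O victory.
--     for row in range(3):
--         if (lauta[row][0] == lauta[row][1] and lauta[row][1] == lauta[row][2]):
--             if (lauta[row][0] == maksivoitava):
--                 return 10
--             elif (lauta[row][0] == minivoitava):
--                 return -10
--
--     # Checking for Columns for X or O victory.
--     for col in range(3):
--
--         if (lauta[0][col] == lauta[1][col] and lauta[1][col] == lauta[2][col]):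
--
--             if (lauta[0][col] == maksivoitava):
--                 return 10
--             elif (lauta[0][col] == minivoitava):
--                 return -10
--
--     # Checking for Diagonals for X or O victory.
--     if (lauta[0][0] == lauta[1][1] and lauta[1][1] == lauta[2][2]):
--
--         if (lauta[0][0] == maksivoitava):
--             return 10
--         elif (lauta[0][0] == minivoitava):
--             return -10
--
--     if (lauta[0][2] == lauta[1][1] and lauta[1][1] == lauta[2][0]):
--
--         if (lauta[0][2] == maksivoitava):
--             return 10
--         elif (lauta[0][2] == minivoitava):
--             return -10
--
--     # Else if none of them have won then return 0
--     return 0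
-- ===== SOURCE B (Python) =====
-- # Bit-parallel reformulation: the board is compressed into two 9-bit occupancy
-- # masks (one per player); a line is won iff the line's bitmask is contained in
-- # the player's mask, so the checking loop does pure integer bitwise tests.
-- WIN_MASKS = [
--     0b000000111,  # row 0
--     0b000111000,  # row 1
--     0b111000000,  # row 2
--     0b001001001,  # col 0
--     0b010010010,  # col 1
--     0b100100100,  # col 2
--     0b100010001,  # main diagonal
--     0b001010100,  # anti diagonal
-- ]
--
--
-- def heurestiikka(lauta, maksivoitava, minivoitava):
--     maxi_mask = 0
--     mini_mask = 0
--     bit = 1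
--     for r in range(3):
--         for c in range(3):
--             v = lauta[r][c]
--             if v == maksivoitava:
--                 maxi_mask |= bit
--             if v == minivoitava:
--                 mini_mask |= bit
--             bit <<= 1
--     for lm in WIN_MASKS:
--         if maxi_mask & lm == lm:
--             return 10
--         if mini_mask & lm == lm:
--             return -10
--     return 0
-- ===== Notes on version B (the rewrite author's own statement) =====
-- stated objective: alternative
-- what changed: B compresses the board in one pass into two 9-bit occupancy bitmasks (one per player) and decides each of the 8 winning lines by a bitwise containment test against a precomputed line mask, instead of A's three blocks of per-cell string comparisons.
-- outside the precondition, e.g. on heurestiikka([['x', 'x', 'x'], [], []], 'x', 'o'): A returns 10, B raises IndexError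
import Mathlib
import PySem

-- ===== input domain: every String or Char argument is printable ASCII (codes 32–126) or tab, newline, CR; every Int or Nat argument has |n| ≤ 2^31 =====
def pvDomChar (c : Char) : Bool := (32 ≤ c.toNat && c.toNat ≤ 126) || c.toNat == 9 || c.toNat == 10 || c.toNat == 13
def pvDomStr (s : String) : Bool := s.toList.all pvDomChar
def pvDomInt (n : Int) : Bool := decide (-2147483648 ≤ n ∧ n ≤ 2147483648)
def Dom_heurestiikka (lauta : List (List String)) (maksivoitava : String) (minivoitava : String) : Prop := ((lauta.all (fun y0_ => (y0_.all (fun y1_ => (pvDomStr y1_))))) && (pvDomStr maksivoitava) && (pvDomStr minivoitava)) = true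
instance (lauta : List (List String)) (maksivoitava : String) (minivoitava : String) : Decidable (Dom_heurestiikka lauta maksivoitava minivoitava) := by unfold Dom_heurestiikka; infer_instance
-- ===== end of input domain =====

-- B replaces A's three blocks of per-cell string comparisons by a bit-parallel scheme: one pass
-- compresses the board into two 9-bit occupancy masks, then each winning line is a bitwise
-- containment test against a precomputed line mask (objective: alternative algorithm, same cost).

-- ===== PORT A =====
-- lauta[r][c]; none = IndexError
def pvCell (lauta : List (List String)) (r c : Int) : Option String :=
  (PySem.List.pyGet? lauta r).bind fun row => PySem.List.pyGet? row c

-- 'for row in range(3)': none = raise, some v = early return; k = the rest of the function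
def pvRowsLoop (lauta : List (List String)) (maksivoitava minivoitava : String)
    (k : Option Int) : List Int → Option Int
  | [] => k
  | row :: rest =>
    match pvCell lauta row 0, pvCell lauta row 1, pvCell lauta row 2 with
    | some a, some b, some c =>
      if a == b && b == c then
        if a == maksivoitava then some 10
        else if a == minivoitava then some (-10)
        else pvRowsLoop lauta maksivoitava minivoitava k rest
      else pvRowsLoop lauta maksivoitava minivoitava k rest
    | _, _, _ => none

-- 'for col in range(3)'
def pvColsLoop (lauta : List (List String)) (maksivoitava minivoitava : String)
    (k : Option Int) : List Int → Option Int
  | [] => k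
  | col :: rest =>
    match pvCell lauta 0 col, pvCell lauta 1 col, pvCell lauta 2 col with
    | some a, some b, some c =>
      if a == b && b == c then
        if a == maksivoitava then some 10
        else if a == minivoitava then some (-10)
        else pvColsLoop lauta maksivoitava minivoitava k rest
      else pvColsLoop lauta maksivoitava minivoitava k rest
    | _, _, _ => none

-- the two diagonal checks followed by 'return 0'
def pvDiags (lauta : List (List String)) (maksivoitava minivoitava : String) : Option Int :=
  let anti : Option Int :=
    match pvCell lauta 0 2, pvCell lauta 1 1, pvCell lauta 2 0 with
    | some a, some b, some c =>
      if a == b && b == c then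
        if a == maksivoitava then some 10
        else if a == minivoitava then some (-10)
        else some 0
      else some 0
    | _, _, _ => none
  match pvCell lauta 0 0, pvCell lauta 1 1, pvCell lauta 2 2 with
  | some a, some b, some c =>
    if a == b && b == c then
      if a == maksivoitava then some 10
      else if a == minivoitava then some (-10)
      else anti
    else anti
  | _, _, _ => none

def heurestiikka (lauta : List (List String)) (maksivoitava : String) (minivoitava : String) : Int :=
  (pvRowsLoop lauta maksivoitava minivoitava
    (pvColsLoop lauta maksivoitava minivoitava
      (pvDiags lauta maksivoitava minivoitava)
      (PySem.List.pyRange 0 3 1))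
    (PySem.List.pyRange 0 3 1)).getD 0

-- ===== PORT B =====
-- WIN_MASKS of Source B (bit index r*3+c): rows, cols, main diagonal, anti diagonal
def pvWinMasks : List Nat := [7, 56, 448, 73, 146, 292, 273, 84]

-- the mask-building double loop of Source B; state (maxi_mask, mini_mask, bit), cells in
-- row-major order; none = IndexError.  Masks are nonnegative Python ints, kept as Nat.
def pvMaskLoop (lauta : List (List String)) (maks mini : String) :
    List (Int × Int) → Nat → Nat → Nat → Option (Nat × Nat)
  | [], mx, mn, _ => some (mx, mn)
  | (r, c) :: rest, mx, mn, bit =>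
    match pvCell lauta r c with
    | none => none
    | some v =>
      pvMaskLoop lauta maks mini rest
        (if v == maks then mx ||| bit else mx)
        (if v == mini then mn ||| bit else mn)
        (bit * 2)

-- row-major cell coordinates produced by 'for r in range(3): for c in range(3)'
def pvCells : List (Int × Int) :=
  [(0, 0), (0, 1), (0, 2), (1, 0), (1, 1), (1, 2), (2, 0), (2, 1), (2, 2)]

-- 'for lm in WIN_MASKS' of Source B
def pvMaskScan (mx mn : Nat) : List Nat → Int
  | [] => 0
  | lm :: rest =>
    if mx &&& lm == lm then 10
    else if mn &&& lm == lm then -10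
    else pvMaskScan mx mn rest

def heurestiikka_alt (lauta : List (List String)) (maksivoitava : String) (minivoitava : String) : Int :=
  match pvMaskLoop lauta maksivoitava minivoitava pvCells 0 0 1 with
  | none => 0   -- unreachable on Pre_ (3x3 board); Python raises here
  | some (mx, mn) => pvMaskScan mx mn pvWinMasks

-- ===== PRECONDITION & SPEC =====
-- Pre_ excludes boards whose first three rows are not all of length ≥ 3: on those B's mask pass
-- raises IndexError, while A may raise too or (on a few ragged boards) return early before
-- reaching a short row (see cites) — a shape no caller of this 3x3 heuristic produces.
def Pre_heurestiikka (lauta : List (List String)) (maksivoitava : String) (minivoitava : String) : Prop :=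
  3 ≤ lauta.length ∧ ∀ i : Fin 3, 3 ≤ (lauta.getD i []).length

instance (lauta : List (List String)) (maksivoitava : String) (minivoitava : String) : Decidable (Pre_heurestiikka lauta maksivoitava minivoitava) := by unfold Pre_heurestiikka; infer_instance

def pvWitness_heurestiikka : List (List String) × String × String :=
  ([["x", "o", "x"], ["o", "x", "o"], ["x", "o", "x"]], "x", "o")

def Spec_heurestiikka (lauta : List (List String)) (maksivoitava : String) (minivoitava : String) (out : Int) : Prop := out = heurestiikka_alt lauta maksivoitava minivoitava
instance (lauta : List (List String)) (maksivoitava : String) (minivoitava : String) (out : Int) : Decidable (Spec_heurestiikka lauta maksivoitava minivoitava out) := by unfold Spec_heurestiikka; infer_instance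

-- ===== CLAIM (what is proved, stated in full; the proofs are below) =====
def Claim_equal_heurestiikka : Prop := ∀ (lauta : List (List String)) (maksivoitava : String) (minivoitava : String), Dom_heurestiikka lauta maksivoitava minivoitava → Pre_heurestiikka lauta maksivoitava minivoitava → Spec_heurestiikka lauta maksivoitava minivoitava (heurestiikka lauta maksivoitava minivoitava)

-- ===== LEMMAS AND PROOFS =====

-- the occupancy mask pvMaskLoop builds, as a function of the nine per-cell membership bits
def pvMaskOf (x0 x1 x2 x3 x4 x5 x6 x7 x8 : Bool) : Nat :=
  let m0 : Nat := if x0 then 0 ||| 1 else 0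
  let m1 := if x1 then m0 ||| 2 else m0
  let m2 := if x2 then m1 ||| 4 else m1
  let m3 := if x3 then m2 ||| 8 else m2
  let m4 := if x4 then m3 ||| 16 else m3
  let m5 := if x5 then m4 ||| 32 else m4
  let m6 := if x6 then m5 ||| 64 else m5
  let m7 := if x7 then m6 ||| 128 else m6
  if x8 then m7 ||| 256 else m7

-- containment of each line mask in pvMaskOf, read back as the three relevant bits
theorem pvMask7 : ∀ x0 x1 x2 x3 x4 x5 x6 x7 x8 : Bool, ((pvMaskOf x0 x1 x2 x3 x4 x5 x6 x7 x8 &&& 7) == 7) = (x0 && (x1 && x2)) := by decide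
theorem pvMask56 : ∀ x0 x1 x2 x3 x4 x5 x6 x7 x8 : Bool, ((pvMaskOf x0 x1 x2 x3 x4 x5 x6 x7 x8 &&& 56) == 56) = (x3 && (x4 && x5)) := by decide
theorem pvMask448 : ∀ x0 x1 x2 x3 x4 x5 x6 x7 x8 : Bool, ((pvMaskOf x0 x1 x2 x3 x4 x5 x6 x7 x8 &&& 448) == 448) = (x6 && (x7 && x8)) := by decide
theorem pvMask73 : ∀ x0 x1 x2 x3 x4 x5 x6 x7 x8 : Bool, ((pvMaskOf x0 x1 x2 x3 x4 x5 x6 x7 x8 &&& 73) == 73) = (x0 && (x3 && x6)) := by decide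
theorem pvMask146 : ∀ x0 x1 x2 x3 x4 x5 x6 x7 x8 : Bool, ((pvMaskOf x0 x1 x2 x3 x4 x5 x6 x7 x8 &&& 146) == 146) = (x1 && (x4 && x7)) := by decide
theorem pvMask292 : ∀ x0 x1 x2 x3 x4 x5 x6 x7 x8 : Bool, ((pvMaskOf x0 x1 x2 x3 x4 x5 x6 x7 x8 &&& 292) == 292) = (x2 && (x5 && x8)) := by decide
theorem pvMask273 : ∀ x0 x1 x2 x3 x4 x5 x6 x7 x8 : Bool, ((pvMaskOf x0 x1 x2 x3 x4 x5 x6 x7 x8 &&& 273) == 273) = (x0 && (x4 && x8)) := by decide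
theorem pvMask84 : ∀ x0 x1 x2 x3 x4 x5 x6 x7 x8 : Bool, ((pvMaskOf x0 x1 x2 x3 x4 x5 x6 x7 x8 &&& 84) == 84) = (x2 && (x4 && x6)) := by decide

-- A's per-line check equals the 'all three cells belong to the player' form B decides by masks
theorem pvLineEq (a b c m n : String) (K : Option Int) :
    (if a == b && b == c then
       if a == m then some (10 : Int) else if a == n then some (-10 : Int) else K
     else K)
    = (if a == m && (b == m && c == m) then some (10 : Int)
       else if a == n && (b == n && c == n) then some (-10 : Int) else K) := by
  by_cases hab : a = b <;> by_cases hbc : b = c <;> by_cases ham : a = m <;>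
    by_cases han : a = n <;> subst_vars <;> simp_all <;> try tauto

-- mask loop on a (≥)3x3 board evaluates to pvMaskOf of the per-cell membership bits
theorem pvMaskLoop_eval (lauta : List (List String)) (m n : String)
    (a0 a1 a2 b0 b1 b2 c0 c1 c2 : String)
    (e00 : pvCell lauta 0 0 = some a0) (e01 : pvCell lauta 0 1 = some a1)
    (e02 : pvCell lauta 0 2 = some a2) (e10 : pvCell lauta 1 0 = some b0)
    (e11 : pvCell lauta 1 1 = some b1) (e12 : pvCell lauta 1 2 = some b2)
    (e20 : pvCell lauta 2 0 = some c0) (e21 : pvCell lauta 2 1 = some c1)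
    (e22 : pvCell lauta 2 2 = some c2) :
    pvMaskLoop lauta m n pvCells 0 0 1 =
      some (pvMaskOf (a0 == m) (a1 == m) (a2 == m) (b0 == m) (b1 == m) (b2 == m)
              (c0 == m) (c1 == m) (c2 == m),
            pvMaskOf (a0 == n) (a1 == n) (a2 == n) (b0 == n) (b1 == n) (b2 == n)
              (c0 == n) (c1 == n) (c2 == n)) := by
  simp only [pvCells, pvMaskLoop, e00, e01, e02, e10, e11, e12, e20, e21, e22, pvMaskOf]


set_option maxHeartbeats 1000000 in
theorem heurestiikka_spec : Claim_equal_heurestiikka := by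
  intro lauta m n _ hpre
  obtain ⟨hlen, hrows⟩ := hpre
  match lauta, hlen with
  | l0 :: l1 :: l2 :: rest, _ =>
    have h0 := hrows 0; have h1 := hrows 1; have h2 := hrows 2
    simp only [List.getD] at h0 h1 h2
    match l0, h0 with
    | a0 :: a1 :: a2 :: t0, _ =>
    match l1, h1 with
    | b0 :: b1 :: b2 :: t1, _ =>
    match l2, h2 with
    | c0 :: c1 :: c2 :: t2, _ =>
      have hr : PySem.List.pyRange 0 3 1 = [0, 1, 2] := by decide
      have e00 : pvCell ((a0::a1::a2::t0)::(b0::b1::b2::t1)::(c0::c1::c2::t2)::rest) 0 0 = some a0 := by simp [pvCell, pysem]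
      have e01 : pvCell ((a0::a1::a2::t0)::(b0::b1::b2::t1)::(c0::c1::c2::t2)::rest) 0 1 = some a1 := by simp [pvCell, pysem]
      have e02 : pvCell ((a0::a1::a2::t0)::(b0::b1::b2::t1)::(c0::c1::c2::t2)::rest) 0 2 = some a2 := by simp [pvCell, pysem]
      have e10 : pvCell ((a0::a1::a2::t0)::(b0::b1::b2::t1)::(c0::c1::c2::t2)::rest) 1 0 = some b0 := by simp [pvCell, pysem]
      have e11 : pvCell ((a0::a1::a2::t0)::(b0::b1::b2::t1)::(c0::c1::c2::t2)::rest) 1 1 = some b1 := by simp [pvCell, pysem]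
      have e12 : pvCell ((a0::a1::a2::t0)::(b0::b1::b2::t1)::(c0::c1::c2::t2)::rest) 1 2 = some b2 := by simp [pvCell, pysem]
      have e20 : pvCell ((a0::a1::a2::t0)::(b0::b1::b2::t1)::(c0::c1::c2::t2)::rest) 2 0 = some c0 := by simp [pvCell, pysem]
      have e21 : pvCell ((a0::a1::a2::t0)::(b0::b1::b2::t1)::(c0::c1::c2::t2)::rest) 2 1 = some c1 := by simp [pvCell, pysem]
      have e22 : pvCell ((a0::a1::a2::t0)::(b0::b1::b2::t1)::(c0::c1::c2::t2)::rest) 2 2 = some c2 := by simp [pvCell, pysem]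
      show Spec_heurestiikka _ _ _ _
      unfold Spec_heurestiikka heurestiikka heurestiikka_alt
      rw [hr, pvMaskLoop_eval _ m n _ _ _ _ _ _ _ _ _ e00 e01 e02 e10 e11 e12 e20 e21 e22]
      simp only [pvRowsLoop, pvColsLoop, pvDiags, e00, e01, e02, e10, e11, e12, e20, e21, e22]
      simp only [pvLineEq]
      simp only [pvWinMasks, pvMaskScan, pvMask7, pvMask56, pvMask448, pvMask73, pvMask146,
        pvMask292, pvMask273, pvMask84]
      simp only [apply_ite (fun o : Option Int => o.getD 0), Option.getD_some]
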